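-- pv_equiv track=rewrite | github.com/stuart-bradley/code_interview_practice | Trees_And_Graphs.py | exercise_4
-- ===== SOURCE A (Python) =====
-- def exercise_4(tree):
-- 	root = min(set(tree.keys()) - set({x for v in tree.values() for x in v}))
-- 	parents = [root]
-- 	reached_leaf = False
-- 	balance_counter = 2
-- 	while parents:
-- 		children = []
-- 		for parent in parents:
-- 			if len(tree[parent]) < 1:
-- 				reached_leaf = True
-- 			else:
-- 				children.extend(tree[parent])
-- 		if reached_leaf and children:
-- 			balance_counter -= 1
-- 			if balance_counter == 0:
-- 				return False
-- 		parents = children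
-- 	return True
-- ===== SOURCE B (Python) =====
-- def exercise_4(tree):
-- 	root = min(set(tree.keys()) - set({x for v in tree.values() for x in v}))
-- 	def span(node):
-- 		children = tree[node]
-- 		if not children:
-- 			return (0, 0)
-- 		pairs = [span(c) for c in children]
-- 		return (1 + min(p[0] for p in pairs), 1 + max(p[1] for p in pairs))
-- 	lo, hi = span(root)
-- 	return hi - lo <= 1
-- ===== Notes on version B (the rewrite author's own statement) =====
-- stated objective: alternative
-- what changed: Replaces the iterative level-order BFS with reached-leaf flag and balance counter by a recursive post-order DFS that computes the minimum and maximum leaf depth below the root and applies the closed-form test max - min <= 1.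
-- outside the precondition, e.g. on exercise_4({0: [1, 2], 1: [], 2: [2]}): A returns False, B raises RecursionError; on exercise_4({0: [1, 2], 1: [], 2: [3], 3: [5]}): A returns False, B raises KeyError
import Mathlib
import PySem

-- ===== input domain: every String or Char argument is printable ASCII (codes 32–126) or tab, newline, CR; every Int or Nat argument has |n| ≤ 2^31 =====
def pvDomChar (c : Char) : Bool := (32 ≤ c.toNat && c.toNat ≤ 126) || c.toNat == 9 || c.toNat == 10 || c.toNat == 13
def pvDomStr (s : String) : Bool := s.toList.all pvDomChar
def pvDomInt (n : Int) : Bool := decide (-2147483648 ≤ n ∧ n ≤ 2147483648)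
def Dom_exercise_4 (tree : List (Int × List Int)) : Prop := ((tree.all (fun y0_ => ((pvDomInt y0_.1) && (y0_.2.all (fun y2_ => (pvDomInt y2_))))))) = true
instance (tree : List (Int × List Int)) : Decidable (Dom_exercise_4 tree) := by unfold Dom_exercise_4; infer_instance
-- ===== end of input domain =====

-- B replaces A's level-order BFS with balance counter by a recursive DFS computing the
-- minimum and maximum leaf depth and the closed-form test max - min ≤ 1 (objective: alternative).

-- ===== PORT A =====
-- shared with port B: both Pythons start with the same root line 'min(set(tree.keys()) - set({...}))'
def pvDict (tree : List (Int × List Int)) : PySem.Dict Int (List Int) := PySem.Dict.ofList tree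

def pvKids (d : PySem.Dict Int (List Int)) (u : Int) : List Int := d.getD u []

def pvAllKids (d : PySem.Dict Int (List Int)) : List Int := d.values.flatten

def pvRoot? (d : PySem.Dict Int (List Int)) : Option Int :=
  PySem.List.min? (PySem.Set.diff (PySem.Set.ofList d.keys) (PySem.Set.ofList (pvAllKids d))) (fun x => x)

-- the inner 'for parent in parents' loop: threads reached_leaf and builds children
def pvLevel (d : PySem.Dict Int (List Int)) (parents : List Int) (reached : Bool) : Bool × List Int :=
  parents.foldl
    (fun st p =>
      if PySem.List.len (pvKids d p) < 1 then (true, st.2)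
      else (st.1, st.2 ++ pvKids d p))
    (reached, [])

-- the 'while parents' loop; fuel only makes it total (A diverges on reachable cycles, outside Pre_)
def pvLoopA (d : PySem.Dict Int (List Int)) : Nat → List Int → Bool → Int → Bool
  | _, [], _, _ => true
  | 0, _ :: _, _, _ => true
  | fuel+1, p :: ps, reached, bc =>
      let st := pvLevel d (p :: ps) reached
      if st.1 && !st.2.isEmpty then
        if bc - 1 = 0 then false
        else pvLoopA d fuel st.2 st.1 (bc - 1)
      else pvLoopA d fuel st.2 st.1 bc

def exercise_4 (tree : List (Int × List Int)) : Bool :=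
  match pvRoot? (pvDict tree) with
  | none => true   -- ValueError: min of empty set (outside Pre_)
  | some root => pvLoopA (pvDict tree) ((pvAllKids (pvDict tree)).length + 2) [root] false 2

-- ===== PORT B =====
-- span node = (min leaf depth, max leaf depth) below node; fuel only makes it total
def pvSpan (d : PySem.Dict Int (List Int)) : Nat → Int → Int × Int
  | 0, _ => (0, 0)
  | fuel+1, node =>
      let children := pvKids d node
      if children.isEmpty then (0, 0)
      else
        let pairs := children.map (pvSpan d fuel)
        match PySem.List.min? (pairs.map Prod.fst) (fun x => x),
              PySem.List.max? (pairs.map Prod.snd) (fun x => x) with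
        | some lo, some hi => (1 + lo, 1 + hi)
        | _, _ => (0, 0)

def exercise_4_alt (tree : List (Int × List Int)) : Bool :=
  match pvRoot? (pvDict tree) with
  | none => true
  | some root =>
      let s := pvSpan (pvDict tree) ((pvAllKids (pvDict tree)).length + 1) root
      decide (s.2 - s.1 ≤ 1)

-- ===== PRECONDITION & SPEC =====
-- helpers for Pre_: nodes reachable from a start list, and the strict descendants of a node
def pvExpand (d : PySem.Dict Int (List Int)) (s : PySem.Set Int) : PySem.Set Int :=
  PySem.Set.update s (s.flatMap (pvKids d))

def pvClosure (d : PySem.Dict Int (List Int)) : Nat → PySem.Set Int → PySem.Set Int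
  | 0, s => s
  | n+1, s => pvClosure d n (pvExpand d s)

def pvReach (d : PySem.Dict Int (List Int)) (xs : List Int) : PySem.Set Int :=
  pvClosure d (xs.length + (pvAllKids d).length + 1) (PySem.Set.ofList xs)

def pvDesc (d : PySem.Dict Int (List Int)) (u : Int) : PySem.Set Int :=
  pvReach d (pvKids d u)

-- Pre_ excludes exactly the inputs on which A does not return its ordinary value: an empty
-- root set (ValueError), a node reachable from the root with no entry (KeyError) or lying on
-- a reachable cycle (A diverges) — plus the rare inputs where the balance counter returns
-- False before the scan reaches the missing entry / cycle (cited in claim.json; B raises there).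
def Pre_exercise_4 (tree : List (Int × List Int)) : Prop :=
  (pvRoot? (pvDict tree)).isSome = true ∧
  ∀ u ∈ pvReach (pvDict tree) (pvRoot? (pvDict tree)).toList,
    (pvDict tree).contains u = true ∧ u ∉ pvDesc (pvDict tree) u

instance (tree : List (Int × List Int)) : Decidable (Pre_exercise_4 tree) := by
  unfold Pre_exercise_4; infer_instance

def pvWitness_exercise_4 : (List (Int × List Int)) := ([(0, [1, 2]), (1, []), (2, [])])

def Spec_exercise_4 (tree : List (Int × List Int)) (out : Bool) : Prop := out = exercise_4_alt tree
instance (tree : List (Int × List Int)) (out : Bool) : Decidable (Spec_exercise_4 tree out) := by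
  unfold Spec_exercise_4; infer_instance

-- ===== CLAIM (what is proved, stated in full; the proofs are below) =====
def Claim_equal_exercise_4 : Prop := ∀ (tree : List (Int × List Int)), Dom_exercise_4 tree → Pre_exercise_4 tree → Spec_exercise_4 tree (exercise_4 tree)

-- ===== LEMMAS AND PROOFS =====

-- ---- a small min/max toolkit (Python's min/max of a nonempty int list) ----
def pvMin : List Int → Int
  | [] => 0
  | x :: t => t.foldl min x

def pvMax : List Int → Int
  | [] => 0
  | x :: t => t.foldl max x

theorem foldl_min_min (t : List Int) : ∀ a b : Int, t.foldl min (min a b) = min a (t.foldl min b) := by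
  induction t with
  | nil => intro a b; rfl
  | cons y t ih =>
      intro a b
      simp only [List.foldl_cons]
      rw [min_assoc, ih]

theorem foldl_max_max (t : List Int) : ∀ a b : Int, t.foldl max (max a b) = max a (t.foldl max b) := by
  induction t with
  | nil => intro a b; rfl
  | cons y t ih =>
      intro a b
      simp only [List.foldl_cons]
      rw [max_assoc, ih]

theorem pvMin_cons {t : List Int} (x : Int) (h : t ≠ []) : pvMin (x :: t) = min x (pvMin t) := by
  match t, h with
  | y :: t', _ =>
      show (y :: t').foldl min x = _
      simp only [List.foldl_cons]
      have : t'.foldl min (min x y) = min x (t'.foldl min y) := foldl_min_min t' x y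
      simpa [pvMin] using this

theorem pvMax_cons {t : List Int} (x : Int) (h : t ≠ []) : pvMax (x :: t) = max x (pvMax t) := by
  match t, h with
  | y :: t', _ =>
      show (y :: t').foldl max x = _
      simp only [List.foldl_cons]
      have : t'.foldl max (max x y) = max x (t'.foldl max y) := foldl_max_max t' x y
      simpa [pvMax] using this

theorem pvMin_append {xs ys : List Int} (h1 : xs ≠ []) (h2 : ys ≠ []) :
    pvMin (xs ++ ys) = min (pvMin xs) (pvMin ys) := by
  induction xs with
  | nil => exact absurd rfl h1
  | cons x t ih =>
      by_cases ht : t = []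
      · subst ht; simpa using pvMin_cons (t := ys) x h2
      · have htys : t ++ ys ≠ [] := by simp [ht]
        rw [List.cons_append, pvMin_cons x htys, ih ht, pvMin_cons x ht, min_assoc]

theorem pvMax_append {xs ys : List Int} (h1 : xs ≠ []) (h2 : ys ≠ []) :
    pvMax (xs ++ ys) = max (pvMax xs) (pvMax ys) := by
  induction xs with
  | nil => exact absurd rfl h1
  | cons x t ih =>
      by_cases ht : t = []
      · subst ht; simpa using pvMax_cons (t := ys) x h2
      · have htys : t ++ ys ≠ [] := by simp [ht]
        rw [List.cons_append, pvMax_cons x htys, ih ht, pvMax_cons x ht, max_assoc]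

theorem pvMin_le {xs : List Int} {y : Int} (h : y ∈ xs) : pvMin xs ≤ y := by
  induction xs with
  | nil => cases h
  | cons x t ih =>
      by_cases ht : t = []
      · subst ht; simp at h; simp [h, pvMin]
      · rw [pvMin_cons x ht]
        rcases List.mem_cons.mp h with h | h
        · subst h; exact min_le_left _ _
        · exact le_trans (min_le_right _ _) (ih h)

theorem le_pvMax {xs : List Int} {y : Int} (h : y ∈ xs) : y ≤ pvMax xs := by
  induction xs with
  | nil => cases h
  | cons x t ih =>
      by_cases ht : t = []
      · subst ht; simp at h; simp [h, pvMax]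
      · rw [pvMax_cons x ht]
        rcases List.mem_cons.mp h with h | h
        · subst h; exact le_max_left _ _
        · exact le_trans (ih h) (le_max_right _ _)

theorem pvMin_mem {xs : List Int} (h : xs ≠ []) : pvMin xs ∈ xs := by
  induction xs with
  | nil => exact absurd rfl h
  | cons x t ih =>
      by_cases ht : t = []
      · subst ht; simp [pvMin]
      · rw [pvMin_cons x ht]
        rcases le_total x (pvMin t) with hle | hle
        · simp [min_eq_left hle]
        · simp [min_eq_right hle, ih ht]

theorem pvMax_mem {xs : List Int} (h : xs ≠ []) : pvMax xs ∈ xs := by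
  induction xs with
  | nil => exact absurd rfl h
  | cons x t ih =>
      by_cases ht : t = []
      · subst ht; simp [pvMax]
      · rw [pvMax_cons x ht]
        rcases le_total x (pvMax t) with hle | hle
        · simp [max_eq_right hle, ih ht]
        · simp [max_eq_left hle]

theorem min?_id_eq {xs : List Int} (h : xs ≠ []) :
    PySem.List.min? xs (fun x => x) = some (pvMin xs) := by
  cases hm : PySem.List.min? xs (fun x => x) with
  | none => exact absurd ((PySem.List.min?_eq_none_iff xs _).mp hm) h
  | some m =>
      have h1 : m ≤ pvMin xs := PySem.List.min?_isMin hm _ (pvMin_mem h)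
      have h2 : pvMin xs ≤ m := pvMin_le (PySem.List.min?_mem hm)
      rw [le_antisymm h1 h2]

theorem max?_id_eq {xs : List Int} (h : xs ≠ []) :
    PySem.List.max? xs (fun x => x) = some (pvMax xs) := by
  cases hm : PySem.List.max? xs (fun x => x) with
  | none => exact absurd ((PySem.List.max?_eq_none_iff xs _).mp hm) h
  | some m =>
      have h1 : pvMax xs ≤ m := PySem.List.max?_isMax hm _ (pvMax_mem h)
      have h2 : m ≤ pvMax xs := le_pvMax (PySem.List.max?_mem hm)
      rw [le_antisymm h2 h1]

theorem pvMin_map_sub {xs : List Int} (h : xs ≠ []) :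
    pvMin (xs.map (fun v => v - 1)) = pvMin xs - 1 := by
  induction xs with
  | nil => exact absurd rfl h
  | cons x t ih =>
      by_cases ht : t = []
      · subst ht; simp [pvMin]
      · have ht' : t.map (fun v => v - 1) ≠ [] := by simpa using ht
        rw [List.map_cons, pvMin_cons _ ht', ih ht, pvMin_cons x ht]
        omega

theorem pvMax_map_sub {xs : List Int} (h : xs ≠ []) :
    pvMax (xs.map (fun v => v - 1)) = pvMax xs - 1 := by
  induction xs with
  | nil => exact absurd rfl h
  | cons x t ih =>
      by_cases ht : t = []
      · subst ht; simp [pvMax]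
      · have ht' : t.map (fun v => v - 1) ≠ [] := by simpa using ht
        rw [List.map_cons, pvMax_cons _ ht', ih ht, pvMax_cons x ht]
        omega

theorem pvMin_flatMap {α : Type} (P : List α) (g : α → List Int) (hP : P ≠ [])
    (hg : ∀ p ∈ P, g p ≠ []) :
    pvMin (P.flatMap g) = pvMin (P.map (fun p => pvMin (g p))) := by
  induction P with
  | nil => exact absurd rfl hP
  | cons p t ih =>
      by_cases ht : t = []
      · subst ht; simp [List.flatMap, pvMin]
      · have h1 : g p ≠ [] := hg p (List.mem_cons_self)
        have h2 : t.flatMap g ≠ [] := by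
          have hh := hg (t.head ht) (List.mem_cons_of_mem _ (List.head_mem ht))
          intro hc
          exact hh (List.flatMap_eq_nil_iff.mp hc _ (List.head_mem ht))
        have h3 : t.map (fun p => pvMin (g p)) ≠ [] := by simpa using ht
        rw [List.flatMap_cons, pvMin_append h1 h2, ih ht (fun q hq => hg q (List.mem_cons_of_mem _ hq)),
          List.map_cons, pvMin_cons _ h3]

theorem pvMax_flatMap {α : Type} (P : List α) (g : α → List Int) (hP : P ≠ [])
    (hg : ∀ p ∈ P, g p ≠ []) :
    pvMax (P.flatMap g) = pvMax (P.map (fun p => pvMax (g p))) := by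
  induction P with
  | nil => exact absurd rfl hP
  | cons p t ih =>
      by_cases ht : t = []
      · subst ht; simp [List.flatMap, pvMax]
      · have h1 : g p ≠ [] := hg p (List.mem_cons_self)
        have h2 : t.flatMap g ≠ [] := by
          have hh := hg (t.head ht) (List.mem_cons_of_mem _ (List.head_mem ht))
          intro hc
          exact hh (List.flatMap_eq_nil_iff.mp hc _ (List.head_mem ht))
        have h3 : t.map (fun p => pvMax (g p)) ≠ [] := by simpa using ht
        rw [List.flatMap_cons, pvMax_append h1 h2, ih ht (fun q hq => hg q (List.mem_cons_of_mem _ hq)),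
          List.map_cons, pvMax_cons _ h3]

theorem flatMap_filter_ne_nil {α : Type} (P : List α) (g : α → List Int) :
    P.flatMap g = (P.filter (fun p => !(g p).isEmpty)).flatMap g := by
  induction P with
  | nil => rfl
  | cons p t ih =>
      by_cases hp : g p = []
      · simp [List.flatMap_cons, hp, ih]
      · have : (g p).isEmpty = false := by simpa [List.isEmpty_iff] using hp
        simp [List.flatMap_cons, this, ih]

theorem pvMax_zero_of_all {xs : List Int} (h : ∀ y ∈ xs, y = (0 : Int)) : pvMax xs = 0 := by
  cases xs with
  | nil => rfl
  | cons x t => exact h _ (pvMax_mem (by simp))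

theorem pvMax_filter {α : Type} (P : List α) (v : α → Int) (q : α → Bool)
    (hv : ∀ p ∈ P, if q p then 1 ≤ v p else v p = 0)
    (h1 : 1 ≤ pvMax (P.map v)) :
    P.filter q ≠ [] ∧ pvMax ((P.filter q).map v) = pvMax (P.map v) := by
  induction P with
  | nil => simp [pvMax] at h1
  | cons p t ih =>
      have hvt : ∀ p ∈ t, if q p then 1 ≤ v p else v p = 0 :=
        fun x hx => hv x (List.mem_cons_of_mem _ hx)
      have hp := hv p List.mem_cons_self
      by_cases hq : q p = true
      · rw [if_pos hq] at hp
        rw [List.filter_cons, if_pos hq]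
        by_cases hft : t.filter q = []
        · have hall : ∀ y ∈ t.map v, y = (0 : Int) := by
            intro y hy
            rcases List.mem_map.mp hy with ⟨x, hx, rfl⟩
            have := hvt x hx
            have hqx : q x = false := by
              by_contra hc
              have : x ∈ t.filter q := List.mem_filter.mpr ⟨hx, by simpa using hc⟩
              rw [hft] at this; cases this
            rwa [hqx, if_neg (by simp)] at this
          constructor
          · simp
          · by_cases ht : t = []
            · subst ht; simp [hft]
            · have h0 : pvMax (t.map v) = 0 := pvMax_zero_of_all hall
              have hr : pvMax ((p :: t).map v) = max (v p) (pvMax (t.map v)) := by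
                rw [List.map_cons, pvMax_cons _ (by simpa using ht)]
              rw [hft, hr, h0]
              simp [pvMax]
              omega
        · have h1t : 1 ≤ pvMax (t.map v) := by
            rcases List.ne_nil_iff_exists_cons.mp hft with ⟨a, l, hal⟩
            have ha : a ∈ t.filter q := by rw [hal]; exact List.mem_cons_self
            rcases List.mem_filter.mp ha with ⟨hat, haq⟩
            have := hvt a hat
            rw [if_pos haq] at this
            exact le_trans this (le_pvMax (List.mem_map.mpr ⟨a, hat, rfl⟩))
          obtain ⟨hne, heq⟩ := ih hvt h1t
          have ht : t ≠ [] := fun hc => hne (by simp [hc])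
          constructor
          · simp
          · rw [List.map_cons, pvMax_cons _ (by simpa using hft), heq,
              List.map_cons, pvMax_cons _ (by simpa using ht)]
      · have hq' : q p = false := by simpa using hq
        rw [hq', if_neg (by simp)] at hp
        rw [List.filter_cons]
        simp only [hq', Bool.false_eq_true, if_false]
        by_cases ht : t = []
        · subst ht; simp [pvMax, hp] at h1
        · rw [List.map_cons, pvMax_cons _ (by simpa using ht), hp] at h1
          have h1t : 1 ≤ pvMax (t.map v) := by
            rcases le_or_gt 1 (pvMax (t.map v)) with h | h
            · exact h
            · omega
          obtain ⟨hne, heq⟩ := ih hvt h1t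
          refine ⟨by simpa using hne, ?_⟩
          rw [heq, List.map_cons, pvMax_cons _ (by simpa using ht), hp]
          omega

-- ---- graph toolkit: closure, closedness, descendants, rank ----
theorem mem_allKids (d : PySem.Dict Int (List Int)) {u c : Int} (h : c ∈ pvKids d u) :
    c ∈ pvAllKids d := by
  unfold pvKids at h
  rw [PySem.Dict.getD_eq_get?_getD] at h
  cases hg : d.get? u with
  | none => rw [hg] at h; simp at h
  | some v =>
      rw [hg] at h
      have hv : v ∈ d.values :=
        List.mem_map.mpr ⟨(u, v), PySem.Dict.mem_items_of_get?_eq_some d hg, rfl⟩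
      exact List.mem_flatten.mpr ⟨v, hv, h⟩

def pvClosed (d : PySem.Dict Int (List Int)) (s : List Int) : Prop :=
  ∀ u ∈ s, ∀ c ∈ pvKids d u, c ∈ s

theorem subset_expand (d : PySem.Dict Int (List Int)) (s : PySem.Set Int) : s ⊆ pvExpand d s := by
  intro x hx
  exact (PySem.Set.mem_update s _ x).mpr (Or.inl hx)

theorem pv_subset_closure (d : PySem.Dict Int (List Int)) :
    ∀ (n : Nat) (s : PySem.Set Int), s ⊆ pvClosure d n s := by
  intro n
  induction n with
  | zero => intro s; exact fun _ h => h
  | succ n ih => intro s; exact fun x hx => ih (pvExpand d s) (subset_expand d s hx)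

theorem closure_mem (d : PySem.Dict Int (List Int)) :
    ∀ (n : Nat) (s : PySem.Set Int) (x : Int), x ∈ pvClosure d n s → x ∈ s ∨ x ∈ pvAllKids d := by
  intro n
  induction n with
  | zero => intro s x hx; exact Or.inl hx
  | succ n ih =>
      intro s x hx
      rcases ih (pvExpand d s) x hx with h | h
      · rcases (PySem.Set.mem_update s _ x).mp h with h | h
        · exact Or.inl h
        · rcases List.mem_flatMap.mp h with ⟨u, _, hk⟩
          exact Or.inr (mem_allKids d hk)
      · exact Or.inr h

theorem closure_nodup (d : PySem.Dict Int (List Int)) :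
    ∀ (n : Nat) (s : PySem.Set Int), s.Nodup → (pvClosure d n s).Nodup := by
  intro n
  induction n with
  | zero => intro s h; exact h
  | succ n ih => intro s h; exact ih _ (PySem.Set.nodup_update s _ h)

theorem closure_of_fix (d : PySem.Dict Int (List Int)) {s : PySem.Set Int}
    (h : pvExpand d s = s) : ∀ n, pvClosure d n s = s := by
  intro n
  induction n with
  | zero => rfl
  | succ n ih => show pvClosure d n (pvExpand d s) = s; rw [h]; exact ih

theorem closed_of_fix (d : PySem.Dict Int (List Int)) {s : PySem.Set Int}
    (h : pvExpand d s = s) : pvClosed d s := by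
  intro u hu c hc
  have : c ∈ pvExpand d s :=
    (PySem.Set.mem_update s _ c).mpr (Or.inr (List.mem_flatMap.mpr ⟨u, hu, hc⟩))
  rwa [h] at this

theorem expand_grow (d : PySem.Dict Int (List Int)) {s : PySem.Set Int}
    (h : pvExpand d s ≠ s) : s.length + 1 ≤ (pvExpand d s).length := by
  unfold pvExpand at *
  rw [PySem.Set.update_eq_append_filter] at h ⊢
  rcases hf : (PySem.Set.ofList (s.flatMap (pvKids d))).filter (fun y => !(PySem.Set.contains s y)) with _ | ⟨a, t⟩
  · rw [hf] at h; simp at h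
  · simp

theorem closure_progress (d : PySem.Dict Int (List Int)) :
    ∀ (n : Nat) (s : PySem.Set Int),
      pvClosed d (pvClosure d n s) ∨ s.length + n ≤ (pvClosure d n s).length := by
  intro n
  induction n with
  | zero => intro s; right; simp [pvClosure]
  | succ n ih =>
      intro s
      by_cases hfix : pvExpand d s = s
      · left
        show pvClosed d (pvClosure d n (pvExpand d s))
        rw [hfix, closure_of_fix d hfix n]
        exact closed_of_fix d hfix
      · rcases ih (pvExpand d s) with h | h
        · left; exact h
        · right
          have := expand_grow d hfix
          show s.length + (n + 1) ≤ (pvClosure d n (pvExpand d s)).length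
          omega

theorem closure_len_le (d : PySem.Dict Int (List Int)) (n : Nat) (s : PySem.Set Int)
    (hs : s.Nodup) : (pvClosure d n s).length ≤ s.length + (pvAllKids d).length := by
  have hnd := closure_nodup d n s hs
  have hsub : pvClosure d n s ⊆ s ++ pvAllKids d := by
    intro x hx
    rcases closure_mem d n s x hx with h | h
    · exact List.mem_append.mpr (Or.inl h)
    · exact List.mem_append.mpr (Or.inr h)
  have := (hnd.subperm hsub).length_le
  simpa using this

theorem reach_closed (d : PySem.Dict Int (List Int)) (xs : List Int) :
    pvClosed d (pvReach d xs) := by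
  unfold pvReach
  rcases closure_progress d (xs.length + (pvAllKids d).length + 1) (PySem.Set.ofList xs) with h | h
  · exact h
  · exfalso
    have h2 := closure_len_le d (xs.length + (pvAllKids d).length + 1) (PySem.Set.ofList xs)
      (PySem.Set.nodup_ofList xs)
    have h3 : (PySem.Set.ofList xs).length ≤ xs.length := PySem.Set.length_ofList_le xs
    omega

theorem reach_sub (d : PySem.Dict Int (List Int)) (xs : List Int) : xs ⊆ pvReach d xs := by
  intro x hx
  exact pv_subset_closure d _ _ ((PySem.Set.mem_ofList _ _).mpr hx)

theorem closure_subset_closed (d : PySem.Dict Int (List Int)) {T : List Int}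
    (hT : pvClosed d T) : ∀ (n : Nat) (s : PySem.Set Int), s ⊆ T → pvClosure d n s ⊆ T := by
  intro n
  induction n with
  | zero => intro s h; exact h
  | succ n ih =>
      intro s h
      apply ih
      intro x hx
      rcases (PySem.Set.mem_update s _ x).mp hx with hx | hx
      · exact h hx
      · rcases List.mem_flatMap.mp hx with ⟨u, hu, hk⟩
        exact hT u (h hu) x hk

theorem reach_nodup (d : PySem.Dict Int (List Int)) (xs : List Int) : (pvReach d xs).Nodup :=
  closure_nodup d _ _ (PySem.Set.nodup_ofList xs)

theorem desc_closed (d : PySem.Dict Int (List Int)) (u : Int) : pvClosed d (pvDesc d u) :=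
  reach_closed d _

theorem kid_mem_desc (d : PySem.Dict Int (List Int)) {u c : Int} (h : c ∈ pvKids d u) :
    c ∈ pvDesc d u :=
  reach_sub d _ h

theorem desc_mono (d : PySem.Dict Int (List Int)) {u c : Int} (h : c ∈ pvDesc d u) :
    pvDesc d c ⊆ pvDesc d u := by
  apply closure_subset_closed d (desc_closed d u)
  intro x hx
  exact desc_closed d u c h x ((PySem.Set.mem_ofList _ _).mp hx)

def pvRank (d : PySem.Dict Int (List Int)) (u : Int) : Nat := (pvDesc d u).length

theorem rank_lt (d : PySem.Dict Int (List Int)) {u c : Int} (hc : c ∈ pvKids d u)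
    (hcc : c ∉ pvDesc d c) : pvRank d c < pvRank d u := by
  have hnd : (c :: pvDesc d c).Nodup := by
    simp only [List.nodup_cons]
    exact ⟨hcc, reach_nodup d _⟩
  have hsub : (c :: pvDesc d c) ⊆ pvDesc d u := by
    intro x hx
    rcases List.mem_cons.mp hx with h | h
    · subst h; exact kid_mem_desc d hc
    · exact desc_mono d (kid_mem_desc d hc) h
  have := (hnd.subperm hsub).length_le
  simp only [List.length_cons] at this
  unfold pvRank
  omega

theorem pv_rank_le (d : PySem.Dict Int (List Int)) (u : Int) :
    pvRank d u ≤ (pvAllKids d).length := by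
  have hnd := reach_nodup d (pvKids d u)
  have hsub : pvDesc d u ⊆ pvAllKids d := by
    intro x hx
    rcases closure_mem d _ _ x hx with h | h
    · exact mem_allKids d ((PySem.Set.mem_ofList _ _).mp h)
    · exact h
  exact (hnd.subperm hsub).length_le

-- ---- span stability and characterisation ----
def pvSp (d : PySem.Dict Int (List Int)) (u : Int) : Int × Int :=
  pvSpan d ((pvAllKids d).length + 1) u

theorem span_stable (d : PySem.Dict Int (List Int)) {R : List Int}
    (hclosed : pvClosed d R) (hacyc : ∀ u ∈ R, u ∉ pvDesc d u) :
    ∀ (k : Nat) (u : Int), u ∈ R → pvRank d u < k →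
      ∀ (f g : Nat), pvRank d u < f → pvRank d u < g → pvSpan d f u = pvSpan d g u := by
  intro k
  induction k with
  | zero => intro u _ hk; exact absurd hk (Nat.not_lt_zero _)
  | succ k ih =>
      intro u hu hk f g hf hg
      match f, g with
      | f'+1, g'+1 =>
        show pvSpan d (f'+1) u = pvSpan d (g'+1) u
        simp only [pvSpan]
        by_cases hke : (pvKids d u).isEmpty
        · simp [hke]
        · have hmap : (pvKids d u).map (pvSpan d f') = (pvKids d u).map (pvSpan d g') := by
            apply List.map_congr_left
            intro c hc
            have hcR : c ∈ R := hclosed u hu c hc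
            have hrank : pvRank d c < pvRank d u := rank_lt d hc (hacyc c hcR)
            exact ih c hcR (by omega) f' g' (by omega) (by omega)
          simp [hke, hmap]

theorem span_unfold (d : PySem.Dict Int (List Int)) {R : List Int}
    (hclosed : pvClosed d R) (hacyc : ∀ u ∈ R, u ∉ pvDesc d u) {u : Int} (hu : u ∈ R) :
    pvSp d u = if pvKids d u = [] then ((0 : Int), (0 : Int))
      else (1 + pvMin ((pvKids d u).map (fun c => (pvSp d c).1)),
            1 + pvMax ((pvKids d u).map (fun c => (pvSp d c).2))) := by
  have hAC := pv_rank_le d u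
  by_cases hke : pvKids d u = []
  · unfold pvSp pvSpan
    simp [hke]
  · have hmap : (pvKids d u).map (pvSpan d ((pvAllKids d).length)) = (pvKids d u).map (pvSp d) := by
      apply List.map_congr_left
      intro c hc
      have hcR : c ∈ R := hclosed u hu c hc
      have hrank : pvRank d c < pvRank d u := rank_lt d hc (hacyc c hcR)
      exact span_stable d hclosed hacyc (pvRank d c + 1) c hcR (by omega) _ _ (by omega) (by omega)
    have hne : (pvKids d u).map (pvSp d) ≠ [] := by simpa using hke
    have hfst : ((pvKids d u).map (pvSp d)).map Prod.fst = (pvKids d u).map (fun c => (pvSp d c).1) := by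
      rw [List.map_map]; rfl
    have hsnd : ((pvKids d u).map (pvSp d)).map Prod.snd = (pvKids d u).map (fun c => (pvSp d c).2) := by
      rw [List.map_map]; rfl
    have hfne : (pvKids d u).map (fun c => (pvSp d c).1) ≠ [] := by simpa using hke
    have hsne : (pvKids d u).map (fun c => (pvSp d c).2) ≠ [] := by simpa using hke
    show pvSpan d ((pvAllKids d).length + 1) u = _
    simp only [pvSpan]
    rw [if_neg (by simpa [List.isEmpty_iff] using hke)]
    rw [hmap, hfst, hsnd, min?_id_eq hfne, max?_id_eq hsne]
    simp [hke]

theorem span_bounds (d : PySem.Dict Int (List Int)) {R : List Int}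
    (hclosed : pvClosed d R) (hacyc : ∀ u ∈ R, u ∉ pvDesc d u) :
    ∀ (k : Nat) (u : Int), u ∈ R → pvRank d u < k →
      0 ≤ (pvSp d u).1 ∧ (pvSp d u).1 ≤ (pvSp d u).2 ∧ (pvSp d u).2 ≤ (pvRank d u : Int) := by
  intro k
  induction k with
  | zero => intro u _ hk; exact absurd hk (Nat.not_lt_zero _)
  | succ k ih =>
      intro u hu hk
      rw [span_unfold d hclosed hacyc hu]
      by_cases hke : pvKids d u = []
      · simp [hke]
      · rw [if_neg hke]
        have hch : ∀ c ∈ pvKids d u, c ∈ R ∧ pvRank d c < pvRank d u := by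
          intro c hc
          have hcR : c ∈ R := hclosed u hu c hc
          exact ⟨hcR, rank_lt d hc (hacyc c hcR)⟩
        have hfne : (pvKids d u).map (fun c => (pvSp d c).1) ≠ [] := by simpa using hke
        have hsne : (pvKids d u).map (fun c => (pvSp d c).2) ≠ [] := by simpa using hke
        obtain ⟨c0, hc0, hc0e⟩ := List.mem_map.mp (pvMin_mem hfne)
        obtain ⟨c1, hc1, hc1e⟩ := List.mem_map.mp (pvMax_mem hsne)
        obtain ⟨hc0R, hc0r⟩ := hch c0 hc0
        obtain ⟨hc1R, hc1r⟩ := hch c1 hc1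
        obtain ⟨b00, b01, b02⟩ := ih c0 hc0R (by omega)
        obtain ⟨b10, b11, b12⟩ := ih c1 hc1R (by omega)
        refine ⟨by omega, ?_, ?_⟩
        · have hle1 : pvMin ((pvKids d u).map (fun c => (pvSp d c).1)) = (pvSp d c0).1 := hc0e.symm
          have hle2 : (pvSp d c0).2 ≤ pvMax ((pvKids d u).map (fun c => (pvSp d c).2)) :=
            le_pvMax (List.mem_map.mpr ⟨c0, hc0, rfl⟩)
          simp only []
          omega
        · have : pvMax ((pvKids d u).map (fun c => (pvSp d c).2)) = (pvSp d c1).2 := hc1e.symm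
          simp only []
          omega

-- ---- the level loop ----
theorem level_spec (d : PySem.Dict Int (List Int)) (P : List Int) :
    ∀ (reached : Bool) (acc : List Int),
      P.foldl
        (fun st p =>
          if PySem.List.len (pvKids d p) < 1 then (true, st.2)
          else (st.1, st.2 ++ pvKids d p))
        (reached, acc)
      = (reached || P.any (fun p => (pvKids d p).isEmpty), acc ++ P.flatMap (pvKids d)) := by
  induction P with
  | nil => intro reached acc; simp
  | cons p t ih =>
      intro reached acc
      by_cases hp : pvKids d p = []
      · have hlt : PySem.List.len (pvKids d p) < 1 := by simp [hp, PySem.List.len]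
        simp only [List.foldl_cons, List.any_cons, List.flatMap_cons, hlt, ih]
        simp [hp]
      · have hlen : ¬ PySem.List.len (pvKids d p) < 1 := by
          have : pvKids d p ≠ [] := hp
          have hl : 0 < (pvKids d p).length := List.length_pos_iff.mpr this
          simp [PySem.List.len]; omega
        simp only [List.foldl_cons, List.any_cons, List.flatMap_cons, if_neg hlen, ih]
        have : (pvKids d p).isEmpty = false := by simpa [List.isEmpty_iff] using hp
        simp [this, List.append_assoc]

theorem pvLevel_eq (d : PySem.Dict Int (List Int)) (P : List Int) (reached : Bool) :
    pvLevel d P reached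
      = (reached || P.any (fun p => (pvKids d p).isEmpty), P.flatMap (pvKids d)) := by
  unfold pvLevel
  simpa using level_spec d P reached []

-- ---- per-node and per-frontier step lemmas ----
theorem sp_leaf (d : PySem.Dict Int (List Int)) {u : Int} (h : pvKids d u = []) :
    pvSp d u = (0, 0) := by
  unfold pvSp pvSpan
  simp [h]

theorem sp_pos (d : PySem.Dict Int (List Int)) {R : List Int}
    (hclosed : pvClosed d R) (hacyc : ∀ u ∈ R, u ∉ pvDesc d u) {u : Int} (hu : u ∈ R)
    (hne : pvKids d u ≠ []) : 1 ≤ (pvSp d u).1 ∧ 1 ≤ (pvSp d u).2 := by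
  rw [span_unfold d hclosed hacyc hu, if_neg hne]
  have hfne : (pvKids d u).map (fun c => (pvSp d c).1) ≠ [] := by simpa using hne
  have hsne : (pvKids d u).map (fun c => (pvSp d c).2) ≠ [] := by simpa using hne
  obtain ⟨c0, hc0, hc0e⟩ := List.mem_map.mp (pvMin_mem hfne)
  obtain ⟨c1, hc1, hc1e⟩ := List.mem_map.mp (pvMax_mem hsne)
  have hc0R : c0 ∈ R := hclosed u hu c0 hc0
  have hc1R : c1 ∈ R := hclosed u hu c1 hc1
  obtain ⟨b0, _, _⟩ := span_bounds d hclosed hacyc (pvRank d c0 + 1) c0 hc0R (by omega)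
  obtain ⟨b1, b1', _⟩ := span_bounds d hclosed hacyc (pvRank d c1 + 1) c1 hc1R (by omega)
  constructor
  · simp only []
    omega
  · simp only []
    omega

theorem mn0_iff (d : PySem.Dict Int (List Int)) {R : List Int}
    (hclosed : pvClosed d R) (hacyc : ∀ u ∈ R, u ∉ pvDesc d u) {P : List Int}
    (hP : P ≠ []) (hsub : ∀ p ∈ P, p ∈ R) :
    (P.any (fun p => (pvKids d p).isEmpty) = true)
      ↔ pvMin (P.map (fun p => (pvSp d p).1)) = 0 := by
  have hne : P.map (fun p => (pvSp d p).1) ≠ [] := by simpa using hP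
  have hnn : 0 ≤ pvMin (P.map (fun p => (pvSp d p).1)) := by
    obtain ⟨c, hc, hce⟩ := List.mem_map.mp (pvMin_mem hne)
    obtain ⟨b, _, _⟩ := span_bounds d hclosed hacyc (pvRank d c + 1) c (hsub c hc) (by omega)
    omega
  constructor
  · intro h
    rcases List.any_eq_true.mp h with ⟨p, hp, hleaf⟩
    have hpe : pvKids d p = [] := by simpa [List.isEmpty_iff] using hleaf
    have h0 : (pvSp d p).1 = 0 := by rw [sp_leaf d hpe]
    have : pvMin (P.map (fun p => (pvSp d p).1)) ≤ 0 := by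
      rw [← h0]; exact pvMin_le (List.mem_map.mpr ⟨p, hp, rfl⟩)
    omega
  · intro h
    obtain ⟨c, hc, hce⟩ := List.mem_map.mp (pvMin_mem hne)
    apply List.any_eq_true.mpr
    refine ⟨c, hc, ?_⟩
    by_contra hcne
    have hcne' : pvKids d c ≠ [] := by simpa [List.isEmpty_iff] using hcne
    obtain ⟨hb, _⟩ := sp_pos d hclosed hacyc (hsub c hc) hcne'
    omega

theorem mx_step (d : PySem.Dict Int (List Int)) {R : List Int}
    (hclosed : pvClosed d R) (hacyc : ∀ u ∈ R, u ∉ pvDesc d u) {P : List Int}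
    (hP : P ≠ []) (hsub : ∀ p ∈ P, p ∈ R)
    (h1 : 1 ≤ pvMax (P.map (fun p => (pvSp d p).2))) :
    pvMax ((P.flatMap (pvKids d)).map (fun c => (pvSp d c).2))
      = pvMax (P.map (fun p => (pvSp d p).2)) - 1 := by
  have hv : ∀ p ∈ P, if !(pvKids d p).isEmpty then 1 ≤ (pvSp d p).2 else (pvSp d p).2 = 0 := by
    intro p hp
    by_cases hpe : pvKids d p = []
    · simp [hpe, sp_leaf d hpe]
    · have := (sp_pos d hclosed hacyc (hsub p hp) hpe).2
      simpa [List.isEmpty_iff, hpe] using this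
  obtain ⟨hQne, hQeq⟩ := pvMax_filter P (fun p => (pvSp d p).2) (fun p => !(pvKids d p).isEmpty) hv h1
  set Q := P.filter (fun p => !(pvKids d p).isEmpty) with hQ
  have hQkids : ∀ p ∈ Q, pvKids d p ≠ [] := by
    intro p hp
    have := (List.mem_filter.mp hp).2
    simpa [List.isEmpty_iff] using this
  have hQsub : ∀ p ∈ Q, p ∈ R := fun p hp => hsub p (List.mem_filter.mp hp).1
  rw [flatMap_filter_ne_nil P (pvKids d), ← hQ, List.map_flatMap]
  rw [pvMax_flatMap Q _ hQne (by intro p hp; simpa using hQkids p hp)]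
  have hmapeq : Q.map (fun p => pvMax ((pvKids d p).map (fun c => (pvSp d c).2)))
      = (Q.map (fun p => (pvSp d p).2)).map (fun v => v - 1) := by
    rw [List.map_map]
    apply List.map_congr_left
    intro p hp
    have := span_unfold d hclosed hacyc (hQsub p hp)
    rw [if_neg (hQkids p hp)] at this
    show pvMax ((pvKids d p).map (fun c => (pvSp d c).2)) = (pvSp d p).2 - 1
    rw [this]
    simp only []
    omega
  rw [hmapeq, pvMax_map_sub (by simpa using hQne), hQeq]

theorem mn_step (d : PySem.Dict Int (List Int)) {R : List Int}
    (hclosed : pvClosed d R) (hacyc : ∀ u ∈ R, u ∉ pvDesc d u) {P : List Int}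
    (hP : P ≠ []) (hsub : ∀ p ∈ P, p ∈ R)
    (hnl : ∀ p ∈ P, pvKids d p ≠ []) :
    pvMin ((P.flatMap (pvKids d)).map (fun c => (pvSp d c).1))
      = pvMin (P.map (fun p => (pvSp d p).1)) - 1 := by
  rw [List.map_flatMap]
  rw [pvMin_flatMap P _ hP (by intro p hp; simpa using hnl p hp)]
  have hmapeq : P.map (fun p => pvMin ((pvKids d p).map (fun c => (pvSp d c).1)))
      = (P.map (fun p => (pvSp d p).1)).map (fun v => v - 1) := by
    rw [List.map_map]
    apply List.map_congr_left
    intro p hp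
    have := span_unfold d hclosed hacyc (hsub p hp)
    rw [if_neg (hnl p hp)] at this
    show pvMin ((pvKids d p).map (fun c => (pvSp d c).1)) = (pvSp d p).1 - 1
    rw [this]
    simp only []
    omega
  rw [hmapeq, pvMin_map_sub (by simpa using hP)]

theorem loopA_nil (d : PySem.Dict Int (List Int)) (f : Nat) (r : Bool) (b : Int) :
    pvLoopA d f [] r b = true := by
  cases f <;> rfl

-- ---- the main loop characterisation ----
theorem loopA_spec (d : PySem.Dict Int (List Int)) {R : List Int}
    (hclosed : pvClosed d R) (hacyc : ∀ u ∈ R, u ∉ pvDesc d u) :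
    ∀ (f : Nat) (P : List Int) (reached : Bool) (bc : Int), P ≠ [] →
      (∀ p ∈ P, p ∈ R) →
      pvMax (P.map (fun p => (pvSp d p).2)) < (f : Int) → 1 ≤ bc →
      pvLoopA d f P reached bc =
        decide ((if reached = true ∨ pvMin (P.map (fun p => (pvSp d p).1)) = 0
                  then pvMax (P.map (fun p => (pvSp d p).2))
                  else pvMax (P.map (fun p => (pvSp d p).2)) - pvMin (P.map (fun p => (pvSp d p).1)))
                < bc) := by
  intro f
  induction f with
  | zero =>
      intro P reached bc hP hsub hfuel hbc
      exfalso
      have hne : P.map (fun p => (pvSp d p).2) ≠ [] := by simpa using hP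
      obtain ⟨c, hc, hce⟩ := List.mem_map.mp (pvMax_mem hne)
      obtain ⟨b0, b1, _⟩ := span_bounds d hclosed hacyc (pvRank d c + 1) c (hsub c hc) (by omega)
      rw [← hce] at hfuel
      simp only [Nat.cast_zero] at hfuel
      omega
  | succ f ih =>
      intro P reached bc hP hsub hfuel hbc
      match P, hP with
      | p :: ps, _ =>
      have hPne : (p :: ps) ≠ [] := by simp
      show pvLoopA d (f+1) (p::ps) reached bc = _
      have hunf : pvLoopA d (f+1) (p::ps) reached bc =
          (if (pvLevel d (p::ps) reached).1 && !(pvLevel d (p::ps) reached).2.isEmpty then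
            (if bc - 1 = 0 then false
             else pvLoopA d f (pvLevel d (p::ps) reached).2 (pvLevel d (p::ps) reached).1 (bc-1))
           else pvLoopA d f (pvLevel d (p::ps) reached).2 (pvLevel d (p::ps) reached).1 bc) := rfl
      rw [hunf, pvLevel_eq]
      simp only []
      push_cast at hfuel
      by_cases hC : (p::ps).flatMap (pvKids d) = []
      · -- every parent is a leaf: the loop exits with True next round
        have hall : ∀ q ∈ p::ps, pvKids d q = [] :=
          fun q hq => List.flatMap_eq_nil_iff.mp hC q hq
        have hmx0 : pvMax ((p::ps).map (fun q => (pvSp d q).2)) = 0 := by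
          apply pvMax_zero_of_all
          intro y hy
          rcases List.mem_map.mp hy with ⟨q, hq, rfl⟩
          rw [sp_leaf d (hall q hq)]
        have hmn0 : pvMin ((p::ps).map (fun q => (pvSp d q).1)) = 0 := by
          obtain ⟨c, hc, hce⟩ := List.mem_map.mp
            (pvMin_mem (show (p::ps).map (fun q => (pvSp d q).1) ≠ [] by simp))
          rw [← hce, sp_leaf d (hall c hc)]
        rw [hC, hmx0]
        rw [if_pos (Or.inr hmn0)]
        simp only [List.isEmpty_nil, Bool.not_true, Bool.and_false, Bool.false_eq_true,
          if_false, loopA_nil]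
        have : (0 : Int) < bc := by omega
        simp [this]
      · -- some parent still has children
        have hCsub : ∀ c ∈ (p::ps).flatMap (pvKids d), c ∈ R := by
          intro c hc
          rcases List.mem_flatMap.mp hc with ⟨q, hq, hk⟩
          exact hclosed q (hsub q hq) c hk
        have hql : ∃ q ∈ p::ps, pvKids d q ≠ [] := by
          by_contra hcon
          push_neg at hcon
          exact hC (List.flatMap_eq_nil_iff.mpr hcon)
        have hmx1 : 1 ≤ pvMax ((p::ps).map (fun q => (pvSp d q).2)) := by
          obtain ⟨q, hq, hqk⟩ := hql
          exact le_trans (sp_pos d hclosed hacyc (hsub q hq) hqk).2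
            (le_pvMax (List.mem_map.mpr ⟨q, hq, rfl⟩))
        have hmxstep := mx_step d hclosed hacyc hPne hsub hmx1
        have hCe : ((p::ps).flatMap (pvKids d)).isEmpty = false := by
          simpa [List.isEmpty_iff] using hC
        rw [hCe]
        simp only [Bool.not_false, Bool.and_true]
        by_cases hrl : (reached || (p::ps).any (fun q => (pvKids d q).isEmpty)) = true
        · rw [hrl]
          have hcond : reached = true ∨ pvMin ((p::ps).map (fun q => (pvSp d q).1)) = 0 := by
            rcases Bool.or_eq_true_iff.mp hrl with h | h
            · exact Or.inl h
            · exact Or.inr ((mn0_iff d hclosed hacyc hPne hsub).mp h)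
          rw [if_pos hcond]
          simp only [if_true]
          by_cases hbc1 : bc - 1 = 0
          · rw [if_pos hbc1]
            have hlt : ¬ pvMax ((p::ps).map (fun q => (pvSp d q).2)) < bc := by omega
            exact (decide_eq_false hlt).symm
          · rw [if_neg hbc1]
            rw [ih ((p::ps).flatMap (pvKids d)) true (bc - 1) hC hCsub
              (by rw [hmxstep]; omega) (by omega)]
            rw [if_pos (Or.inl rfl), hmxstep]
            apply decide_eq_decide.mpr
            omega
        · have hrl' : (reached || (p::ps).any (fun q => (pvKids d q).isEmpty)) = false := by
            simpa using hrl
          rw [hrl']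
          simp only [Bool.false_eq_true, if_false]
          obtain ⟨hre, hany⟩ := Bool.or_eq_false_iff.mp hrl'
          have hnl : ∀ q ∈ p::ps, pvKids d q ≠ [] := by
            intro q hq
            have := List.any_eq_false.mp hany q hq
            simpa [List.isEmpty_iff] using this
          have hmn1 : 1 ≤ pvMin ((p::ps).map (fun q => (pvSp d q).1)) := by
            obtain ⟨c, hc, hce⟩ := List.mem_map.mp
              (pvMin_mem (show (p::ps).map (fun q => (pvSp d q).1) ≠ [] by simp))
            rw [← hce]
            exact (sp_pos d hclosed hacyc (hsub c hc) (hnl c hc)).1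
          have hmnstep := mn_step d hclosed hacyc hPne hsub hnl
          rw [ih ((p::ps).flatMap (pvKids d)) false bc hC hCsub
            (by rw [hmxstep]; omega) hbc]
          rw [hmxstep, hmnstep, hre]
          simp only [Bool.false_eq_true, false_or]
          rw [if_neg (show ¬ pvMin ((p::ps).map (fun q => (pvSp d q).1)) = 0 by omega)]
          by_cases hmne : pvMin ((p::ps).map (fun q => (pvSp d q).1)) - 1 = 0
          · rw [if_pos hmne]
            apply decide_eq_decide.mpr
            omega
          · rw [if_neg hmne]
            apply decide_eq_decide.mpr
            omega

-- ===== VERDICT (by name: the statement is the Claim_ definition above) =====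
theorem exercise_4_spec : Claim_equal_exercise_4 := by
  intro tree _ hpre
  unfold Spec_exercise_4
  obtain ⟨hsome, hR⟩ := hpre
  cases hr : pvRoot? (pvDict tree) with
  | none => rw [hr] at hsome; simp at hsome
  | some root =>
      have htl : (pvRoot? (pvDict tree)).toList = [root] := by rw [hr]; rfl
      rw [htl] at hR
      have hclosed := reach_closed (pvDict tree) [root]
      have hacyc : ∀ u ∈ pvReach (pvDict tree) [root], u ∉ pvDesc (pvDict tree) u :=
        fun u hu => (hR u hu).2
      have hrootR : root ∈ pvReach (pvDict tree) [root] := reach_sub _ [root] (by simp)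
      have hA : exercise_4 tree
          = pvLoopA (pvDict tree) ((pvAllKids (pvDict tree)).length + 2) [root] false 2 := by
        unfold exercise_4
        rw [hr]
      have hB : exercise_4_alt tree
          = decide ((pvSp (pvDict tree) root).2 - (pvSp (pvDict tree) root).1 ≤ 1) := by
        unfold exercise_4_alt
        rw [hr]
        rfl
      rw [hA, hB]
      obtain ⟨hb0, hb1, hb2⟩ := span_bounds (pvDict tree) hclosed hacyc
        (pvRank (pvDict tree) root + 1) root hrootR (by omega)
      have hrk : (pvRank (pvDict tree) root : Int) ≤ ((pvAllKids (pvDict tree)).length : Int) :=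
        Nat.cast_le.mpr (pv_rank_le _ root)
      have hfuel : pvMax ([root].map (fun p => (pvSp (pvDict tree) p).2))
          < (((pvAllKids (pvDict tree)).length + 2 : Nat) : Int) := by
        have : pvMax ([root].map (fun p => (pvSp (pvDict tree) p).2))
            = (pvSp (pvDict tree) root).2 := rfl
        rw [this]
        push_cast
        omega
      rw [loopA_spec (pvDict tree) hclosed hacyc _ [root] false 2 (by simp)
        (by intro p hp; rw [List.mem_singleton] at hp; subst hp; exact hrootR) hfuel (by omega)]
      have hmx : pvMax ([root].map (fun p => (pvSp (pvDict tree) p).2))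
          = (pvSp (pvDict tree) root).2 := rfl
      have hmn : pvMin ([root].map (fun p => (pvSp (pvDict tree) p).1))
          = (pvSp (pvDict tree) root).1 := rfl
      rw [hmx, hmn]
      simp only [Bool.false_eq_true, false_or]
      by_cases h0 : (pvSp (pvDict tree) root).1 = 0
      · rw [if_pos h0]
        apply decide_eq_decide.mpr
        omega
      · rw [if_neg h0]
        apply decide_eq_decide.mpr
        omega
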